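-- pv_equiv track=rewrite | github.com/aarizag/FunctionalProgramming | Amuse-Bouche/double_and_sum.py | doubleAndSum_2a1
-- ===== SOURCE A (Python) =====
-- from typing import List, Tuple
--
-- def doubleAndSum_2a1(xs: List[int]) -> int:
--     """
--     two elements of xs at a time
--     local variables: i, total.
--     """
--     (acc, i) = (0, 0)
--     while i < len(xs):
--         acc += xs[i]
--         if i+1 < len(xs):
--             acc += 2*xs[i+1]
--         i += 2
--     return acc
-- ===== SOURCE B (Python) =====
-- def doubleAndSum_2a1(xs):
--     evens = xs[0::2]
--     odds = xs[1::2]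
--     return sum(evens) + 2 * sum(odds)
-- ===== Notes on version B (the rewrite author's own statement) =====
-- stated objective: simpler
-- what changed: Replaces the interleaved index loop with its inner bounds check by two parity slices xs[0::2]/xs[1::2] summed separately, the odd-index slice weighted by 2.
import Mathlib
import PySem

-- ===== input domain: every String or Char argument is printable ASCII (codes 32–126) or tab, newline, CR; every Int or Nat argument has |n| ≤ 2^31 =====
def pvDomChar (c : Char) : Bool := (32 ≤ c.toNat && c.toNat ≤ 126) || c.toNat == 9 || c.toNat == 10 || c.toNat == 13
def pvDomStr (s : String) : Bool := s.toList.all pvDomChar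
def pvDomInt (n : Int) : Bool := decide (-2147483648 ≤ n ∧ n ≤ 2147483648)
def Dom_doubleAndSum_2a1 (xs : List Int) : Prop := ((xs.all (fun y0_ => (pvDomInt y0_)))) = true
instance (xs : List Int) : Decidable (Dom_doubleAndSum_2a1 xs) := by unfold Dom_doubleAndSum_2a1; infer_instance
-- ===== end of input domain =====

-- B replaces A's interleaved two-at-a-time index loop (with an inner bounds check)
-- by two parity slices xs[0::2] and xs[1::2] summed separately, the odd slice weighted by 2 (objective: simpler).


-- ===== PORT A =====
-- while i < len(xs): acc += xs[i]; if i+1 < len(xs): acc += 2*xs[i+1]; i += 2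
def dasLoopA (xs : List Int) (acc : Int) (i : Nat) : Int :=
  if i < xs.length then
    let acc1 := acc + xs.getD i 0
    let acc2 := if i + 1 < xs.length then acc1 + 2 * xs.getD (i + 1) 0 else acc1
    dasLoopA xs acc2 (i + 2)
  else acc
termination_by xs.length - i

def doubleAndSum_2a1 (xs : List Int) : Int := dasLoopA xs 0 0

-- ===== PORT B =====
def doubleAndSum_2a1_alt (xs : List Int) : Int :=
  let evens := (PySem.List.slice? xs (some 0) none 2).getD []   -- xs[0::2]
  let odds := (PySem.List.slice? xs (some 1) none 2).getD []    -- xs[1::2]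
  evens.sum + 2 * odds.sum

-- ===== PRECONDITION & SPEC =====
def Spec_doubleAndSum_2a1 (xs : List Int) (out : Int) : Prop := out = doubleAndSum_2a1_alt xs
instance (xs : List Int) (out : Int) : Decidable (Spec_doubleAndSum_2a1 xs out) := by unfold Spec_doubleAndSum_2a1; infer_instance

-- ===== CLAIM (what is proved, stated in full; the proofs are below) =====
def Claim_equal_doubleAndSum_2a1 : Prop := ∀ (xs : List Int), Dom_doubleAndSum_2a1 xs → Spec_doubleAndSum_2a1 xs (doubleAndSum_2a1 xs)

-- ===== LEMMAS AND PROOFS =====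

-- the common pairwise specification: first element once, second twice, recurse
def pairSum : List Int → Int
  | [] => 0
  | [a] => a
  | a :: b :: t => a + 2 * b + pairSum t

-- the even- and odd-indexed sublists (xs[0::2] and xs[1::2])
mutual
def evensL {α : Type} : List α → List α
  | [] => []
  | a :: t => a :: oddsL t
def oddsL {α : Type} : List α → List α
  | [] => []
  | _ :: t => evensL t
end

theorem pairSum_eq (xs : List Int) :
    pairSum xs = (evensL xs).sum + 2 * (oddsL xs).sum := by
  fun_induction pairSum xs
  · simp [evensL, oddsL]
  · simp [evensL, oddsL]
  · simp [evensL, oddsL, *]; ring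

theorem pairSum_drop (xs : List Int) (i : Nat) (h : i < xs.length) (h2 : i + 1 < xs.length) :
    pairSum (xs.drop i) = xs[i] + 2 * xs[i+1] + pairSum (xs.drop (i+2)) := by
  rw [List.drop_eq_getElem_cons h, List.drop_eq_getElem_cons h2]
  simp [pairSum]

theorem pairSum_drop_last (xs : List Int) (i : Nat) (h : i < xs.length) (h2 : ¬ i + 1 < xs.length) :
    pairSum (xs.drop i) = xs[i] := by
  rw [List.drop_eq_getElem_cons h]
  have hnil : xs.drop (i+1) = [] := List.drop_eq_nil_of_le (by omega)
  simp [hnil, pairSum]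

theorem dasLoopA_eq (xs : List Int) (acc : Int) (i : Nat) :
    dasLoopA xs acc i = acc + pairSum (xs.drop i) := by
  fun_induction dasLoopA xs acc i
  case case1 acc i h acc1 acc2 ih =>
    rw [ih]
    simp only [acc2, acc1]
    by_cases h2 : i + 1 < xs.length
    · rw [pairSum_drop xs i h h2]
      simp [List.getD_eq_getElem?_getD, List.getElem?_eq_getElem h, h2]
      ring
    · rw [pairSum_drop_last xs i h h2]
      have hnil : xs.drop (i+2) = [] := List.drop_eq_nil_of_le (by omega)
      simp [List.getD_eq_getElem?_getD, List.getElem?_eq_getElem h, h2, hnil, pairSum]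
  case case2 acc i h =>
    have hnil : xs.drop i = [] := List.drop_eq_nil_of_le (by omega)
    simp [hnil, pairSum]

theorem filterMap_parity (xs : List Int) :
    (List.range ((xs.length + 1) / 2)).filterMap (fun k => xs[2 * k]?) = evensL xs ∧
    (List.range (xs.length / 2)).filterMap (fun k => xs[2 * k + 1]?) = oddsL xs := by
  induction xs with
  | nil => simp [evensL, oddsL]
  | cons a t ih =>
    constructor
    · have hc : (t.length + 1 + 1) / 2 = t.length / 2 + 1 := by omega
      rw [List.length_cons, hc, List.range_succ_eq_map, List.filterMap_cons,
        List.filterMap_map]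
      simp only [Nat.mul_zero, List.getElem?_cons_zero, Function.comp_def]
      have : ∀ k : Nat, (a :: t)[2 * (k + 1)]? = t[2 * k + 1]? := by
        intro k
        have : 2 * (k + 1) = (2 * k + 1) + 1 := by ring
        rw [this, List.getElem?_cons_succ]
      simp only [this]
      rw [ih.2]
      rfl
    · have hc : (t.length + 1) / 2 = (t.length + 1) / 2 := rfl
      rw [List.length_cons]
      have : ∀ k : Nat, (a :: t)[2 * k + 1]? = t[2 * k]? := by
        intro k; rw [List.getElem?_cons_succ]
      simp only [this]
      rw [ih.1]
      rfl

theorem slice_even (xs : List Int) :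
    PySem.List.slice? xs (some 0) none 2 = some (evensL xs) := by
  have h2 : (2 : Int) ≠ 0 := by norm_num
  simp only [PySem.List.slice?, PySem.List.sliceIndices, if_neg h2]
  norm_num
  have hcnt : (if 0 < xs.length then (((xs.length : Int) + 2 - 1) / 2).toNat else 0)
      = (xs.length + 1) / 2 := by
    split
    · have : ((xs.length : Int) + 2 - 1) = ((xs.length + 1 : Nat) : Int) := by push_cast; ring
      rw [this]
      rw [show ((2:Int)) = ((2:Nat):Int) from rfl, ← Int.natCast_div, Int.toNat_natCast]
    · omega
  rw [hcnt]
  have hix : ∀ k : Nat, ((2 * (k:Int)).toNat) = 2 * k := by intro k; omega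
  simp only [hix]
  exact (filterMap_parity xs).1

theorem slice_odd (xs : List Int) :
    PySem.List.slice? xs (some 1) none 2 = some (oddsL xs) := by
  have h2 : (2 : Int) ≠ 0 := by norm_num
  simp only [PySem.List.slice?, PySem.List.sliceIndices, if_neg h2]
  norm_num
  by_cases hl : 1 ≤ xs.length
  · have hmin : min (1:Int) (xs.length:Int) = 1 := by
      have : (1:Int) ≤ (xs.length:Int) := by exact_mod_cast hl
      omega
    rw [hmin]
    have hcnt : (if 1 < xs.length then (((xs.length : Int) - 1 + 2 - 1) / 2).toNat else 0)
        = xs.length / 2 := by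
      split
      · have : ((xs.length : Int) - 1 + 2 - 1) = ((xs.length : Nat) : Int) := by ring
        rw [this, show ((2:Int)) = ((2:Nat):Int) from rfl, ← Int.natCast_div, Int.toNat_natCast]
      · omega
    rw [hcnt]
    have hix : ∀ k : Nat, (((1:Int) + 2 * (k:Int)).toNat) = 2 * k + 1 := by intro k; omega
    simp only [hix]
    exact (filterMap_parity xs).2
  · have hl0 : xs.length = 0 := by omega
    have hnil : xs = [] := List.eq_nil_of_length_eq_zero hl0
    subst hnil
    simp [oddsL]

-- ===== VERDICT (by name: the statement is the Claim_ definition above) =====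
theorem doubleAndSum_2a1_spec : Claim_equal_doubleAndSum_2a1 := by
  intro xs _
  unfold Spec_doubleAndSum_2a1 doubleAndSum_2a1 doubleAndSum_2a1_alt
  rw [slice_even, slice_odd]
  simpa [dasLoopA_eq] using pairSum_eq xs
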